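-- pv_equiv track=rewrite | github.com/jcjorel/ec2-enable-imdsv2 | ec2_enable_imdsv2/account_defaults.py | get_account_defaults_stats
-- ===== SOURCE A (Python) =====
-- def get_account_defaults_stats(region_defaults: dict) -> dict:
--     """
--     Get statistics about account defaults across regions
--
--     Args:
--         region_defaults: Dictionary mapping region to HttpTokens value
--
--     Returns:
--         Dictionary with statistics
--     """
--     total = len(region_defaults)
--     required = sum(1 for v in region_defaults.values() if v == 'required')
--     optional = sum(1 for v in region_defaults.values() if v == 'optional')
--     not_set = sum(1 for v in region_defaults.values() if v is None or v == 'no-preference')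
--
--     return {
--         'total': total,
--         'required': required,
--         'optional': optional,
--         'not_set': not_set,
--         'needs_update': optional + not_set
--     }
-- ===== SOURCE B (Python) =====
-- def get_account_defaults_stats(region_defaults: dict) -> dict:
--     """Single-pass re-implementation: one loop with if/elif instead of three scans."""
--     required = 0
--     optional = 0
--     not_set = 0
--     for v in region_defaults.values():
--         if v == 'required':
--             required += 1
--         elif v == 'optional':
--             optional += 1
--         elif v is None or v == 'no-preference':
--             not_set += 1
--     return {
--         'total': len(region_defaults),
--         'required': required,
--         'optional': optional,
--         'not_set': not_set,
--         'needs_update': optional + not_set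
--     }
-- ===== Notes on version B (the rewrite author's own statement) =====
-- stated objective: simpler
-- what changed: Replaced the three separate generator-expression scans over the values by one if/elif loop that accumulates all three counters in a single traversal.
import Mathlib
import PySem

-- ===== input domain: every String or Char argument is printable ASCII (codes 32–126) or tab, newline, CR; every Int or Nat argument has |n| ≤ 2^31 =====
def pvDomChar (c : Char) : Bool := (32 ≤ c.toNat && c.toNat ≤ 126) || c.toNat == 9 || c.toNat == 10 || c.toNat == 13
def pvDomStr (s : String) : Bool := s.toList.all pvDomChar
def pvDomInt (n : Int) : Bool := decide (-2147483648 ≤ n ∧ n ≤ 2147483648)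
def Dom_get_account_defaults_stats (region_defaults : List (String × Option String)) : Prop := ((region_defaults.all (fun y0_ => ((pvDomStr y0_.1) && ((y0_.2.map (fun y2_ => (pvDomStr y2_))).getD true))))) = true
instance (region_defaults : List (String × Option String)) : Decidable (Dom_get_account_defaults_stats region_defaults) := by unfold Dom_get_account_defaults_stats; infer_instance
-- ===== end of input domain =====

-- B replaces A's three separate scans of the values by one if/elif loop accumulating all counters (objective: simpler, single pass).

-- ===== PORT A =====
def get_account_defaults_stats (region_defaults : List (String × Option String)) : List (String × Int) :=
  let total : Int := region_defaults.length
  let required : Int := (region_defaults.map Prod.snd).foldl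
    (fun acc v => if v == some "required" then acc + 1 else acc) 0
  let optional : Int := (region_defaults.map Prod.snd).foldl
    (fun acc v => if v == some "optional" then acc + 1 else acc) 0
  let not_set : Int := (region_defaults.map Prod.snd).foldl
    (fun acc v => if v == none || v == some "no-preference" then acc + 1 else acc) 0
  [("total", total), ("required", required), ("optional", optional),
   ("not_set", not_set), ("needs_update", optional + not_set)]

-- ===== PORT B =====
-- single loop over the values, updating three accumulators with if/elif (mirrors Source B's for loop)
def pvLoopB : List (String × Option String) → Int → Int → Int → Int × Int × Int
  | [], r, o, n => (r, o, n)
  | (_, v) :: t, r, o, n =>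
    if v == some "required" then pvLoopB t (r + 1) o n
    else if v == some "optional" then pvLoopB t r (o + 1) n
    else if v == none || v == some "no-preference" then pvLoopB t r o (n + 1)
    else pvLoopB t r o n

def get_account_defaults_stats_alt (region_defaults : List (String × Option String)) : List (String × Int) :=
  let c := pvLoopB region_defaults 0 0 0
  [("total", (region_defaults.length : Int)), ("required", c.1), ("optional", c.2.1),
   ("not_set", c.2.2), ("needs_update", c.2.1 + c.2.2)]

-- ===== PRECONDITION & SPEC =====
def Spec_get_account_defaults_stats (region_defaults : List (String × Option String)) (out : List (String × Int)) : Prop := out = get_account_defaults_stats_alt region_defaults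
instance (region_defaults : List (String × Option String)) (out : List (String × Int)) : Decidable (Spec_get_account_defaults_stats region_defaults out) := by unfold Spec_get_account_defaults_stats; infer_instance

-- ===== CLAIM (what is proved, stated in full; the proofs are below) =====
def Claim_equal_get_account_defaults_stats : Prop := ∀ (region_defaults : List (String × Option String)), Dom_get_account_defaults_stats region_defaults → Spec_get_account_defaults_stats region_defaults (get_account_defaults_stats region_defaults)

-- ===== LEMMAS AND PROOFS =====
theorem pvLoopB_eq (l : List (String × Option String)) : ∀ (r o n : Int),
    pvLoopB l r o n =
      (l.foldl (fun acc p => if p.2 == some "required" then acc + 1 else acc) r,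
       l.foldl (fun acc p => if p.2 == some "optional" then acc + 1 else acc) o,
       l.foldl (fun acc p => if p.2 == none || p.2 == some "no-preference" then acc + 1 else acc) n) := by
  induction l with
  | nil => intro r o n; simp [pvLoopB]
  | cons h t ih =>
    intro r o n
    obtain ⟨k, v⟩ := h
    by_cases h1 : v = some "required"
    · simp [pvLoopB, h1, ih]
    · by_cases h2 : v = some "optional"
      · simp [pvLoopB, h1, h2, ih]
      · by_cases h3 : v = none ∨ v = some "no-preference"
        · rcases h3 with h3 | h3 <;> simp [pvLoopB, h1, h2, h3, ih]
        · push_neg at h3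
          simp [pvLoopB, h1, h2, h3.1, h3.2, ih]

-- ===== VERDICT (by name: the statement is the Claim_ definition above) =====
theorem get_account_defaults_stats_spec : Claim_equal_get_account_defaults_stats := by
  intro rd _
  unfold Spec_get_account_defaults_stats get_account_defaults_stats get_account_defaults_stats_alt
  simp [pvLoopB_eq, List.foldl_map]
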